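-- pv_equiv track=rewrite | github.com/6uan/tip | Week_12/Unit_11/Standard Problem Set 1/problem3.py | list_all_escape_routes
-- ===== SOURCE A (Python) =====
-- def list_all_escape_routes(grid):
--     if not grid:
--         return []
--
--     rows = len(grid)
--     cols = len(grid[0])
--
--     if rows == 0 or cols == 0:
--         return []
--
--     sr, sc = rows - 1, cols - 1
--
--     directions = [(-1, 0), (1, 0), (0, -1), (0, 1)]
--
--     visited = set()
--
--     def helper(r, c):
--         stack = [(r, c)]
--         visited.add((r, c))
--
--         while stack:
--             row, col = stack.pop()
--             for dr, dc in directions: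
--                 nr, nc = row + dr, col + dc
--                 if 0 <= nr < rows and 0 <= nc < cols:
--                     if grid[nr][nc] == 1 and (nr, nc) not in visited:
--                         visited.add((nr, nc))
--                         stack.append((nr, nc))
--
--     helper(sr, sc)
--
--     return sorted(list(visited))
-- ===== SOURCE B (Python) =====
-- def list_all_escape_routes(grid):
--     if not grid:
--         return []
--
--     rows = len(grid)
--     cols = len(grid[0])
--
--     if rows == 0 or cols == 0:
--         return []
--
--     visited = {(rows - 1, cols - 1)}
--
--     # fixed-point iteration: rescan the whole grid, absorbing any 1-cell
--     # adjacent to the visited region, until one full pass adds nothing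
--     changed = True
--     while changed:
--         changed = False
--         for r in range(rows):
--             for c in range(cols):
--                 if grid[r][c] == 1 and (r, c) not in visited:
--                     if ((r - 1, c) in visited or (r + 1, c) in visited
--                             or (r, c - 1) in visited or (r, c + 1) in visited):
--                         visited.add((r, c))
--                         changed = True
--
--     return sorted(visited)
-- ===== Notes on version B (the rewrite author's own statement) =====
-- stated objective: alternative
-- what changed: Replaces the stack-based depth-first flood fill with a chaotic fixed-point iteration: repeatedly rescan the whole grid, absorbing every 1-cell adjacent to the visited region, until one full pass adds nothing; no stack or frontier is kept.
-- outside the precondition, e.g. on list_all_escape_routes([[0, 0], [0]]): A returns [(1, 1)], B raises IndexError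
import Mathlib
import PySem

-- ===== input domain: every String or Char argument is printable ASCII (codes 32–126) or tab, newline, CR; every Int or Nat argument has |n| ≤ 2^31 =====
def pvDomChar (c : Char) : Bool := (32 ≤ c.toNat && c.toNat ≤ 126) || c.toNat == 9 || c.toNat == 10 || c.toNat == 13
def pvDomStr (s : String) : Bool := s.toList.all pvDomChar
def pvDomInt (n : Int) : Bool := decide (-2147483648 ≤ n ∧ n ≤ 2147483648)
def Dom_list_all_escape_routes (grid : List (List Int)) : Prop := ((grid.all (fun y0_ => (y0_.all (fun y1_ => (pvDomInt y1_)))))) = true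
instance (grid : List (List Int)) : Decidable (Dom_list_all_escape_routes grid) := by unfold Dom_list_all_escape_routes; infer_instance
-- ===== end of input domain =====

-- B replaces A's explicit-stack depth-first flood fill by a whole-grid fixed-point iteration
-- (rescan until a pass adds nothing); alternative decomposition, same sorted set of reachable cells.

-- Helpers shared by both ports:
def pvDirs : List (Int × Int) := [(-1, 0), (1, 0), (0, -1), (0, 1)]

def pvInB (rows cols nr nc : Int) : Bool := decide (0 ≤ nr ∧ nr < rows ∧ 0 ≤ nc ∧ nc < cols)

-- grid[nr][nc] == 1 via pyGet?: on a ragged row the cell is `none` (Python raises IndexError there; excluded by Pre_)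
def pvAt1 (grid : List (List Int)) (nr nc : Int) : Bool :=
  decide ((PySem.List.pyGet? grid nr).bind (fun row => PySem.List.pyGet? row nc) = some 1)

-- Termination bookkeeping (cited by the ports' decreasing_by): cells of the grid not yet visited
def pvCells (rows cols : Int) : List (Int × Int) :=
  (PySem.List.pyRange 0 rows).flatMap (fun r => (PySem.List.pyRange 0 cols).map (fun c => (r, c)))

def pvMissing (rows cols : Int) (vis : PySem.Set (Int × Int)) : Nat :=
  ((pvCells rows cols).filter (fun q => !(PySem.Set.contains vis q))).length

theorem pvMem_cells {rows cols nr nc : Int} (h : pvInB rows cols nr nc = true) :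
    (nr, nc) ∈ pvCells rows cols := by
  simp only [pvInB, decide_eq_true_eq] at h
  simp only [pvCells, List.mem_flatMap, List.mem_map, PySem.List.mem_pyRange_one]
  exact ⟨nr, by omega, nc, by omega, rfl⟩

theorem pvFilter_len_le {α : Type} (p q : α → Bool) (h : ∀ x, q x = true → p x = true) :
    ∀ l : List α, (l.filter q).length ≤ (l.filter p).length := by
  intro l
  induction l with
  | nil => simp
  | cons a t ih =>
    by_cases hq : q a = true
    · simp [hq, h a hq]; omega
    · simp only [List.filter_cons]
      rcases Bool.eq_false_or_eq_true (p a) with hp | hp <;>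
        simp [hq, hp] <;> omega

theorem pvMissing_add_lt (rows cols : Int) (vis : PySem.Set (Int × Int)) (x : Int × Int)
    (hx : x ∈ pvCells rows cols) (hv : PySem.Set.contains vis x = false) :
    pvMissing rows cols (PySem.Set.add vis x) < pvMissing rows cols vis := by
  obtain ⟨l1, l2, hsplit⟩ := List.append_of_mem hx
  have hnm : x ∉ vis := by simpa [PySem.Set.contains_eq_decide] using hv
  have hx1 : (!PySem.Set.contains (PySem.Set.add vis x) x) = false := by
    simp [hnm]
  have hx2 : (!PySem.Set.contains vis x) = true := by rw [hv]; rfl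
  have hmono : ∀ y, (!PySem.Set.contains (PySem.Set.add vis x) y) = true →
      (!PySem.Set.contains vis y) = true := by
    intro y hy
    simp only [Bool.not_eq_true', PySem.Set.contains_eq_decide, decide_eq_false_iff_not,
      PySem.Set.mem_add] at *
    tauto
  have h1 := pvFilter_len_le _ _ hmono l1
  have h2 := pvFilter_len_le _ _ hmono l2
  unfold pvMissing
  rw [hsplit]
  simp only [List.filter_append, List.filter_cons, hx1, hx2, Bool.false_eq_true, if_false,
    if_true, List.length_append, List.length_cons]
  omega

-- ===== PORT A =====
-- one direction step of A's inner `for dr, dc in directions` (state = (stack, visited); stack held top-first,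
-- Python appends to and pops from the list's end)
def pvPushA (grid : List (List Int)) (rows cols row col : Int)
    (st : List (Int × Int) × PySem.Set (Int × Int)) (d : Int × Int) :
    List (Int × Int) × PySem.Set (Int × Int) :=
  -- nr = row + dr, nc = col + dc
  if pvInB rows cols (row + d.1) (col + d.2) && pvAt1 grid (row + d.1) (col + d.2) &&
      !(PySem.Set.contains st.2 (row + d.1, col + d.2)) then
    ((row + d.1, col + d.2) :: st.1, PySem.Set.add st.2 (row + d.1, col + d.2))
  else st

theorem pvPushA_measure (grid : List (List Int)) (rows cols row col : Int)
    (st : List (Int × Int) × PySem.Set (Int × Int)) (d : Int × Int) :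
    5 * pvMissing rows cols (pvPushA grid rows cols row col st d).2 +
      (pvPushA grid rows cols row col st d).1.length ≤
    5 * pvMissing rows cols st.2 + st.1.length := by
  unfold pvPushA
  split
  · next h =>
    simp only [Bool.and_eq_true, Bool.not_eq_true'] at h
    have := pvMissing_add_lt rows cols st.2 _ (pvMem_cells h.1.1) h.2
    simp only [List.length_cons]
    omega
  · omega

theorem pvFoldA_measure (grid : List (List Int)) (rows cols row col : Int) :
    ∀ (ds : List (Int × Int)) (st : List (Int × Int) × PySem.Set (Int × Int)),
    5 * pvMissing rows cols (ds.foldl (pvPushA grid rows cols row col) st).2 +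
      (ds.foldl (pvPushA grid rows cols row col) st).1.length ≤
    5 * pvMissing rows cols st.2 + st.1.length := by
  intro ds
  induction ds with
  | nil => intro st; simp
  | cons d ds ih =>
    intro st
    calc _ ≤ 5 * pvMissing rows cols (pvPushA grid rows cols row col st d).2 +
              (pvPushA grid rows cols row col st d).1.length := ih _
      _ ≤ _ := pvPushA_measure grid rows cols row col st d

theorem pvLoopA_dec (grid : List (List Int)) (rows cols : Int) (rc : Int × Int)
    (rest : List (Int × Int)) (visited : PySem.Set (Int × Int)) :
    5 * pvMissing rows cols ((pvDirs.foldl (pvPushA grid rows cols rc.1 rc.2) (rest, visited)).2) +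
      (pvDirs.foldl (pvPushA grid rows cols rc.1 rc.2) (rest, visited)).1.length <
    5 * pvMissing rows cols visited + (rc :: rest).length := by
  have := pvFoldA_measure grid rows cols rc.1 rc.2 pvDirs (rest, visited)
  dsimp only at this
  simp only [List.length_cons]
  omega

-- A's `while stack:` loop
def pvLoopA (grid : List (List Int)) (rows cols : Int)
    (stack : List (Int × Int)) (visited : PySem.Set (Int × Int)) : PySem.Set (Int × Int) :=
  match stack with
  | [] => visited
  | rc :: rest =>
    let st := pvDirs.foldl (pvPushA grid rows cols rc.1 rc.2) (rest, visited)
    pvLoopA grid rows cols st.1 st.2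
termination_by 5 * pvMissing rows cols visited + stack.length
decreasing_by
  exact pvLoopA_dec grid rows cols rc rest visited

def list_all_escape_routes (grid : List (List Int)) : List (Int × Int) :=
  if grid = [] then []
  else
    let rows : Int := (grid.length : Int)
    let cols : Int := ((grid.headD []).length : Int)
    if rows = 0 ∨ cols = 0 then []
    else
      let sr := rows - 1
      let sc := cols - 1
      -- helper(sr, sc): stack = [(r, c)]; visited.add((r, c)); while stack: …
      let visited := pvLoopA grid rows cols [(sr, sc)] (PySem.Set.add PySem.Set.empty (sr, sc))
      -- sorted(list(visited)); toLex gives Python's lexicographic tuple order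
      PySem.List.sorted visited (fun p => toLex p)

-- ===== PORT B =====
-- B's absorption test for one scanned cell (r, c):
-- grid[r][c] == 1 and (r, c) not in visited and some 4-neighbour already in visited
def pvCondB (grid : List (List Int)) (vis : PySem.Set (Int × Int)) (q : Int × Int) : Bool :=
  pvAt1 grid q.1 q.2 && !(PySem.Set.contains vis q) &&
    (PySem.Set.contains vis (q.1 - 1, q.2) || PySem.Set.contains vis (q.1 + 1, q.2) ||
     PySem.Set.contains vis (q.1, q.2 - 1) || PySem.Set.contains vis (q.1, q.2 + 1))

-- one scanned cell of B's double `for` loop (state = (visited, changed))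
def pvScanStep (grid : List (List Int)) (st : PySem.Set (Int × Int) × Bool) (q : Int × Int) :
    PySem.Set (Int × Int) × Bool :=
  if pvCondB grid st.1 q then (PySem.Set.add st.1 q, true) else st

-- one full pass `for r in range(rows): for c in range(cols): …` starting with changed = False
def pvScan (grid : List (List Int)) (rows cols : Int) (vis : PySem.Set (Int × Int)) :
    PySem.Set (Int × Int) × Bool :=
  (pvCells rows cols).foldl (pvScanStep grid) (vis, false)

theorem pvScanFold_measure (grid : List (List Int)) (rows cols : Int) :
    ∀ (l : List (Int × Int)), (∀ q ∈ l, q ∈ pvCells rows cols) →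
    ∀ (st : PySem.Set (Int × Int) × Bool),
    pvMissing rows cols (l.foldl (pvScanStep grid) st).1 ≤ pvMissing rows cols st.1 ∧
    (st.2 = false → (l.foldl (pvScanStep grid) st).2 = true →
      pvMissing rows cols (l.foldl (pvScanStep grid) st).1 < pvMissing rows cols st.1) := by
  intro l
  induction l with
  | nil => intro _ st; exact ⟨le_refl _, fun h1 h2 => absurd (h1 ▸ h2) (by simp)⟩
  | cons q l ih =>
    intro hsub st
    have hq := hsub q (List.mem_cons_self ..)
    have hsub' := fun x hx => hsub x (List.mem_cons_of_mem _ hx)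
    simp only [List.foldl_cons]
    unfold pvScanStep
    split
    · next hc =>
      simp only [pvCondB, Bool.and_eq_true, Bool.not_eq_true'] at hc
      have hlt := pvMissing_add_lt rows cols st.1 q hq hc.1.2
      obtain ⟨hle, _⟩ := ih hsub' (PySem.Set.add st.1 q, true)
      exact ⟨le_trans hle (le_of_lt hlt), fun _ _ => lt_of_le_of_lt hle hlt⟩
    · exact ih hsub' st

-- B's `while changed:` loop (each iteration is one full pass over the grid)
def pvLoopFix (grid : List (List Int)) (rows cols : Int)
    (visited : PySem.Set (Int × Int)) : PySem.Set (Int × Int) :=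
  let st := pvScan grid rows cols visited
  if h : st.2 = true then pvLoopFix grid rows cols st.1 else st.1
termination_by pvMissing rows cols visited
decreasing_by
  exact (pvScanFold_measure grid rows cols (pvCells rows cols) (fun _ hx => hx)
    (visited, false)).2 rfl h

def list_all_escape_routes_alt (grid : List (List Int)) : List (Int × Int) :=
  if grid = [] then []
  else
    let rows : Int := (grid.length : Int)
    let cols : Int := ((grid.headD []).length : Int)
    if rows = 0 ∨ cols = 0 then []
    else
      -- visited = {(rows-1, cols-1)}; while changed: rescan the whole grid
      PySem.List.sorted
        (pvLoopFix grid rows cols (PySem.Set.add PySem.Set.empty (rows - 1, cols - 1)))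
        (fun p => toLex p)

-- ===== PRECONDITION & SPEC =====
-- Pre_ excludes ragged grids (a row shorter than the first row): there B's full-grid scan (and, when the
-- fill reaches past a short row, A) raises IndexError; on ragged grids whose short cells are never reached
-- A returns normally while B still raises (see claim cites).
def Pre_list_all_escape_routes (grid : List (List Int)) : Prop :=
  ∀ row ∈ grid, (grid.headD []).length ≤ row.length
instance (grid : List (List Int)) : Decidable (Pre_list_all_escape_routes grid) := by
  unfold Pre_list_all_escape_routes; infer_instance

def pvWitness_list_all_escape_routes : List (List Int) := [[0, 1], [1, 0]]

def Spec_list_all_escape_routes (grid : List (List Int)) (out : List (Int × Int)) : Prop := out = list_all_escape_routes_alt grid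
instance (grid : List (List Int)) (out : List (Int × Int)) : Decidable (Spec_list_all_escape_routes grid out) := by unfold Spec_list_all_escape_routes; infer_instance

-- ===== CLAIM (what is proved, stated in full; the proofs are below) =====
def Claim_equal_list_all_escape_routes : Prop := ∀ (grid : List (List Int)), Dom_list_all_escape_routes grid → Pre_list_all_escape_routes grid → Spec_list_all_escape_routes grid (list_all_escape_routes grid)

-- ===== LEMMAS AND PROOFS =====

theorem pvCells_inB {rows cols : Int} {q : Int × Int} (h : q ∈ pvCells rows cols) :
    pvInB rows cols q.1 q.2 = true := by
  simp only [pvCells, List.mem_flatMap, List.mem_map, PySem.List.mem_pyRange_one] at h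
  obtain ⟨r, hr, c, hc, rfl⟩ := h
  simp only [pvInB, decide_eq_true_eq]
  omega


-- a cell a flood-fill step may move INTO: in bounds and holding 1
def pvOkP (grid : List (List Int)) (rows cols : Int) (q : Int × Int) : Prop :=
  pvInB rows cols q.1 q.2 = true ∧ pvAt1 grid q.1 q.2 = true

def pvAdjP (p q : Int × Int) : Prop := ∃ d ∈ pvDirs, q = (p.1 + d.1, p.2 + d.2)

inductive pvReach (grid : List (List Int)) (rows cols : Int) (s : Int × Int) : Int × Int → Prop
  | base : pvReach grid rows cols s s
  | step {p q : Int × Int} : pvReach grid rows cols s p → pvAdjP p q →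
      pvOkP grid rows cols q → pvReach grid rows cols s q

def pvClosed (grid : List (List Int)) (rows cols : Int) (V : List (Int × Int)) : Prop :=
  ∀ p ∈ V, ∀ q, pvAdjP p q → pvOkP grid rows cols q → q ∈ V

theorem pvReach_subset {grid : List (List Int)} {rows cols : Int} {s : Int × Int}
    {V : List (Int × Int)} (hs : s ∈ V) (hc : pvClosed grid rows cols V) :
    ∀ x, pvReach grid rows cols s x → x ∈ V := by
  intro x h
  induction h with
  | base => exact hs
  | step _ hadj hok ih => exact hc _ ih _ hadj hok

theorem pvPushA_facts (grid : List (List Int)) (rows cols row col : Int)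
    (st : List (Int × Int) × PySem.Set (Int × Int)) (d : Int × Int) :
    (∀ x ∈ st.2, x ∈ (pvPushA grid rows cols row col st d).2) ∧
    (∀ x ∈ st.1, x ∈ (pvPushA grid rows cols row col st d).1) ∧
    (∀ x ∈ (pvPushA grid rows cols row col st d).1,
        x ∈ st.1 ∨ x ∈ (pvPushA grid rows cols row col st d).2) ∧
    (∀ x ∈ (pvPushA grid rows cols row col st d).2,
        x ∈ st.2 ∨ (x = (row + d.1, col + d.2) ∧ pvOkP grid rows cols x)) ∧
    (∀ x ∈ (pvPushA grid rows cols row col st d).2,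
        x ∉ st.2 → x ∈ (pvPushA grid rows cols row col st d).1) ∧
    (st.2.Nodup → (pvPushA grid rows cols row col st d).2.Nodup) ∧
    (pvOkP grid rows cols (row + d.1, col + d.2) →
        (row + d.1, col + d.2) ∈ (pvPushA grid rows cols row col st d).2) := by
  unfold pvPushA
  split
  · next h =>
    simp only [Bool.and_eq_true, Bool.not_eq_true'] at h
    refine ⟨?_, ?_, ?_, ?_, ?_, ?_, ?_⟩
    · intro x hx; exact (PySem.Set.mem_add _ _ _).mpr (Or.inl hx)
    · intro x hx; exact List.mem_cons_of_mem _ hx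
    · intro x hx
      rcases List.mem_cons.mp hx with hx | hx
      · exact Or.inr ((PySem.Set.mem_add _ _ _).mpr (Or.inr hx))
      · exact Or.inl hx
    · intro x hx
      rcases (PySem.Set.mem_add _ _ _).mp hx with hx | hx
      · exact Or.inl hx
      · exact Or.inr ⟨hx, by rw [hx]; exact ⟨h.1.1, h.1.2⟩⟩
    · intro x hx hnx
      rcases (PySem.Set.mem_add _ _ _).mp hx with hx | hx
      · exact absurd hx hnx
      · rw [hx]; exact List.mem_cons_self ..
    · intro h2; exact PySem.Set.nodup_add _ _ h2
    · intro _; exact (PySem.Set.mem_add _ _ _).mpr (Or.inr rfl)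
  · next h =>
    refine ⟨fun x hx => hx, fun x hx => hx, fun x hx => Or.inl hx, fun x hx => Or.inl hx,
      fun x hx hnx => absurd hx hnx, id, ?_⟩
    intro hok
    simp only [Bool.and_eq_true, Bool.not_eq_true', not_and] at h
    have hc := h ⟨hok.1, hok.2⟩
    have : PySem.Set.contains st.2 (row + d.1, col + d.2) = true := by
      rcases Bool.eq_false_or_eq_true (PySem.Set.contains st.2 (row + d.1, col + d.2)) with h' | h'
      · exact h'
      · exact absurd h' hc
    simpa [PySem.Set.contains_eq_decide] using this

theorem pvFoldA_facts (grid : List (List Int)) (rows cols row col : Int) :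
    ∀ (ds : List (Int × Int)) (st : List (Int × Int) × PySem.Set (Int × Int)),
    (∀ x ∈ st.2, x ∈ (ds.foldl (pvPushA grid rows cols row col) st).2) ∧
    (∀ x ∈ st.1, x ∈ (ds.foldl (pvPushA grid rows cols row col) st).1) ∧
    (∀ x ∈ (ds.foldl (pvPushA grid rows cols row col) st).1,
        x ∈ st.1 ∨ x ∈ (ds.foldl (pvPushA grid rows cols row col) st).2) ∧
    (∀ x ∈ (ds.foldl (pvPushA grid rows cols row col) st).2,
        x ∈ st.2 ∨ ∃ d ∈ ds, x = (row + d.1, col + d.2) ∧ pvOkP grid rows cols x) ∧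
    (∀ x ∈ (ds.foldl (pvPushA grid rows cols row col) st).2,
        x ∉ st.2 → x ∈ (ds.foldl (pvPushA grid rows cols row col) st).1) ∧
    (st.2.Nodup → (ds.foldl (pvPushA grid rows cols row col) st).2.Nodup) ∧
    (∀ d ∈ ds, pvOkP grid rows cols (row + d.1, col + d.2) →
        (row + d.1, col + d.2) ∈ (ds.foldl (pvPushA grid rows cols row col) st).2) := by
  intro ds
  induction ds with
  | nil =>
    intro st
    exact ⟨fun x hx => hx, fun x hx => hx, fun x hx => Or.inl hx, fun x hx => Or.inl hx,
      fun x hx h => absurd hx h, id, fun d hd => absurd hd (by simp)⟩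
  | cons d ds ih =>
    intro st
    obtain ⟨P1, P2, P3, P4, P5, P6, P7⟩ := pvPushA_facts grid rows cols row col st d
    obtain ⟨I1, I2, I3, I4, I5, I6, I7⟩ := ih (pvPushA grid rows cols row col st d)
    simp only [List.foldl_cons]
    refine ⟨fun x hx => I1 x (P1 x hx), fun x hx => I2 x (P2 x hx), ?_, ?_, ?_,
      fun h => I6 (P6 h), ?_⟩
    · intro x hx
      rcases I3 x hx with h | h
      · rcases P3 x h with h' | h'
        · exact Or.inl h'
        · exact Or.inr (I1 x h')
      · exact Or.inr h
    · intro x hx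
      rcases I4 x hx with h | h
      · rcases P4 x h with h' | h'
        · exact Or.inl h'
        · exact Or.inr ⟨d, List.mem_cons_self .., h'⟩
      · obtain ⟨d', hd', hq⟩ := h
        exact Or.inr ⟨d', List.mem_cons_of_mem _ hd', hq⟩
    · intro x hx hnx
      by_cases hmem : x ∈ (pvPushA grid rows cols row col st d).2
      · exact I2 x (P5 x hmem hnx)
      · exact I5 x hx hmem
    · intro d' hd' hok
      rcases List.mem_cons.mp hd' with h | h
      · rw [h]; exact I1 _ (P7 (by rw [← h]; exact hok))
      · exact I7 d' h hok

theorem pvLoopA_spec (grid : List (List Int)) (rows cols : Int) (s : Int × Int) :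
    ∀ (stack : List (Int × Int)) (visited : PySem.Set (Int × Int)),
    (∀ x ∈ stack, x ∈ visited) →
    (∀ p ∈ visited, p ∉ stack → ∀ q, pvAdjP p q → pvOkP grid rows cols q → q ∈ visited) →
    (∀ p ∈ visited, pvReach grid rows cols s p) →
    visited.Nodup →
    (∀ x ∈ visited, x ∈ pvLoopA grid rows cols stack visited) ∧
    (∀ p ∈ pvLoopA grid rows cols stack visited, pvReach grid rows cols s p) ∧
    pvClosed grid rows cols (pvLoopA grid rows cols stack visited) ∧
    (pvLoopA grid rows cols stack visited).Nodup := by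
  intro stack visited
  induction stack, visited using pvLoopA.induct grid rows cols with
  | case1 visited =>
    intro _hsub hcl hreach hnd
    rw [pvLoopA]
    exact ⟨fun x hx => hx, hreach, fun p hp q hadj hok => hcl p hp (by simp) q hadj hok, hnd⟩
  | case2 visited rc rest st ih =>
    intro hsub hcl hreach hnd
    obtain ⟨C1, C2, C3, C4, C5, C6, C7⟩ := pvFoldA_facts grid rows cols rc.1 rc.2 pvDirs (rest, visited)
    have hrcv : rc ∈ visited := hsub rc (List.mem_cons_self ..)
    have hsub' : ∀ x ∈ st.1, x ∈ st.2 := by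
      intro x hx
      rcases C3 x hx with h | h
      · exact C1 x (hsub x (List.mem_cons_of_mem _ h))
      · exact h
    have hreach' : ∀ p ∈ st.2, pvReach grid rows cols s p := by
      intro p hp
      rcases C4 p hp with h | ⟨d, hd, hq, hok⟩
      · exact hreach p h
      · exact pvReach.step (hreach rc hrcv) ⟨d, hd, hq⟩ hok
    have hcl' : ∀ p ∈ st.2, p ∉ st.1 → ∀ q, pvAdjP p q → pvOkP grid rows cols q → q ∈ st.2 := by
      intro p hp hpst q hadj hok
      by_cases hpv : p ∈ visited
      · by_cases hprc : p = rc
        · obtain ⟨d, hd, hq⟩ := hadj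
          rw [hq, hprc]
          exact C7 d hd (by rw [← hprc, ← hq]; exact hok)
        · have hpstack : p ∉ rc :: rest := by
            intro hmem
            rcases List.mem_cons.mp hmem with h | h
            · exact hprc h
            · exact hpst (C2 p h)
          exact C1 q (hcl p hpv hpstack q hadj hok)
      · exact absurd (C5 p hp hpv) hpst
    obtain ⟨J1, J2, J3, J4⟩ := ih hsub' hcl' hreach' (C6 hnd)
    rw [pvLoopA]
    exact ⟨fun x hx => J1 x (C1 x hx), J2, J3, J4⟩

-- B-side lemmas (fixed-point scan) --------------------------------------------

-- a fired pvCondB certifies a flood-fill step into q from some visited neighbour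
theorem pvCondB_step {grid : List (List Int)} {rows cols : Int} {vis : PySem.Set (Int × Int)}
    {q : Int × Int} (hq : q ∈ pvCells rows cols) (hc : pvCondB grid vis q = true) :
    ∃ p ∈ vis, pvAdjP p q ∧ pvOkP grid rows cols q := by
  have hok : pvOkP grid rows cols q := ⟨pvCells_inB hq, by
    simp only [pvCondB, Bool.and_eq_true] at hc; exact hc.1.1⟩
  simp only [pvCondB, Bool.and_eq_true, Bool.or_eq_true, PySem.Set.contains_eq_decide,
    decide_eq_true_eq] at hc
  rcases hc.2 with ((h | h) | h) | h
  · exact ⟨(q.1 - 1, q.2), h, ⟨(1, 0), by simp [pvDirs], by simp⟩, hok⟩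
  · exact ⟨(q.1 + 1, q.2), h, ⟨(-1, 0), by simp [pvDirs], by simp⟩, hok⟩
  · exact ⟨(q.1, q.2 - 1), h, ⟨(0, 1), by simp [pvDirs], by simp⟩, hok⟩
  · exact ⟨(q.1, q.2 + 1), h, ⟨(0, -1), by simp [pvDirs], by simp⟩, hok⟩

-- the changed flag never reverts from True to False during a pass
theorem pvScanFlag_mono (grid : List (List Int)) :
    ∀ (m : List (Int × Int)) (st : PySem.Set (Int × Int) × Bool),
    st.2 = true → (m.foldl (pvScanStep grid) st).2 = true := by
  intro m
  induction m with
  | nil => intro st h; exact h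
  | cons a m ihm =>
    intro st h
    simp only [List.foldl_cons]
    by_cases hc : pvCondB grid st.1 a = true
    · rw [show pvScanStep grid st a = (PySem.Set.add st.1 a, true) from by
        simp [pvScanStep, hc]]
      exact ihm _ rfl
    · rw [show pvScanStep grid st a = st from by simp [pvScanStep, hc]]
      exact ihm _ h

-- properties of one pass's fold: the visited set only grows, reachability and Nodup are preserved,
-- and if the changed flag ends False the pass left visited untouched with no condition firing
theorem pvScanFold_facts (grid : List (List Int)) (rows cols : Int) (s : Int × Int) :
    ∀ (l : List (Int × Int)), (∀ q ∈ l, q ∈ pvCells rows cols) →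
    ∀ (st : PySem.Set (Int × Int) × Bool),
    (∀ x ∈ st.1, x ∈ (l.foldl (pvScanStep grid) st).1) ∧
    ((∀ p ∈ st.1, pvReach grid rows cols s p) →
      ∀ p ∈ (l.foldl (pvScanStep grid) st).1, pvReach grid rows cols s p) ∧
    (st.1.Nodup → (l.foldl (pvScanStep grid) st).1.Nodup) ∧
    ((l.foldl (pvScanStep grid) st).2 = false →
      (l.foldl (pvScanStep grid) st).1 = st.1 ∧ ∀ q ∈ l, pvCondB grid st.1 q = false) := by
  intro l
  induction l with
  | nil =>
    intro _ st
    exact ⟨fun x hx => hx, fun h => h, id, fun _ => ⟨rfl, fun q hq => absurd hq (by simp)⟩⟩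
  | cons q l ih =>
    intro hsub st
    have hq := hsub q (List.mem_cons_self ..)
    have hsub' := fun x hx => hsub x (List.mem_cons_of_mem _ hx)
    simp only [List.foldl_cons]
    by_cases hc : pvCondB grid st.1 q = true
    · rw [show pvScanStep grid st q = (PySem.Set.add st.1 q, true) from by
        simp [pvScanStep, hc]]
      obtain ⟨I1, I2, I3, _⟩ := ih hsub' (PySem.Set.add st.1 q, true)
      refine ⟨fun x hx => I1 x ((PySem.Set.mem_add _ _ _).mpr (Or.inl hx)), ?_, ?_, ?_⟩
      · intro hr
        refine I2 ?_
        intro p hp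
        rcases (PySem.Set.mem_add _ _ _).mp hp with hp | hp
        · exact hr p hp
        · obtain ⟨p', hp', hadj, hok⟩ := pvCondB_step hq hc
          exact hp ▸ pvReach.step (hr p' hp') hadj hok
      · intro hnd; exact I3 (PySem.Set.nodup_add _ _ hnd)
      · intro hfalse
        -- the flag is already true, so it cannot end False
        have := pvScanFlag_mono grid l (PySem.Set.add st.1 q, true) rfl
        rw [hfalse] at this
        exact absurd this (by simp)
    · rw [show pvScanStep grid st q = st from by simp [pvScanStep, hc]]
      obtain ⟨I1, I2, I3, I4⟩ := ih hsub' st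
      refine ⟨I1, I2, I3, ?_⟩
      intro hfalse
      obtain ⟨heq, hall⟩ := I4 hfalse
      refine ⟨heq, fun q' hq' => ?_⟩
      rcases List.mem_cons.mp hq' with h | h
      · rw [h]; exact Bool.of_not_eq_true hc
      · exact hall q' h

-- one-step unfoldings of B's while loop
theorem pvLoopFix_eq_true (grid : List (List Int)) (rows cols : Int)
    (visited : PySem.Set (Int × Int)) (h : (pvScan grid rows cols visited).2 = true) :
    pvLoopFix grid rows cols visited =
      pvLoopFix grid rows cols (pvScan grid rows cols visited).1 := by
  rw [pvLoopFix]
  simp [h]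

theorem pvLoopFix_eq_false (grid : List (List Int)) (rows cols : Int)
    (visited : PySem.Set (Int × Int)) (h : (pvScan grid rows cols visited).2 = false) :
    pvLoopFix grid rows cols visited = (pvScan grid rows cols visited).1 := by
  rw [pvLoopFix]
  simp [h]

theorem pvLoopFix_spec (grid : List (List Int)) (rows cols : Int) (s : Int × Int) :
    ∀ (visited : PySem.Set (Int × Int)),
    (∀ p ∈ visited, pvReach grid rows cols s p) →
    visited.Nodup →
    (∀ x ∈ visited, x ∈ pvLoopFix grid rows cols visited) ∧
    (∀ p ∈ pvLoopFix grid rows cols visited, pvReach grid rows cols s p) ∧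
    pvClosed grid rows cols (pvLoopFix grid rows cols visited) ∧
    (pvLoopFix grid rows cols visited).Nodup := by
  intro visited
  induction visited using pvLoopFix.induct grid rows cols with
  | case1 visited st hflag ih =>
    intro hreach hnd
    obtain ⟨S1, S2, S3, _⟩ := pvScanFold_facts grid rows cols s (pvCells rows cols)
      (fun _ hx => hx) (visited, false)
    -- pvScan is definitionally the fold, so the S-facts transport
    have hS1 : ∀ x ∈ visited, x ∈ (pvScan grid rows cols visited).1 := S1
    have hS2 : ∀ p ∈ (pvScan grid rows cols visited).1, pvReach grid rows cols s p :=
      S2 hreach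
    have hS3 : ((pvScan grid rows cols visited).1).Nodup := S3 hnd
    have hflag' : (pvScan grid rows cols visited).2 = true := hflag
    obtain ⟨J1, J2, J3, J4⟩ := ih hS2 hS3
    rw [pvLoopFix_eq_true grid rows cols visited hflag']
    exact ⟨fun x hx => J1 x (hS1 x hx), J2, J3, J4⟩
  | case2 visited st hflag =>
    intro hreach hnd
    have hfl : (pvScan grid rows cols visited).2 = false := Bool.of_not_eq_true hflag
    obtain ⟨S1, S2, S3, S4⟩ := pvScanFold_facts grid rows cols s (pvCells rows cols)
      (fun _ hx => hx) (visited, false)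
    have hS4 : (pvScan grid rows cols visited).1 = visited ∧
        ∀ q ∈ pvCells rows cols, pvCondB grid visited q = false := S4 hfl
    obtain ⟨heq, hnone⟩ := hS4
    rw [pvLoopFix_eq_false grid rows cols visited hfl, heq]
    refine ⟨fun x hx => hx, hreach, ?_, hnd⟩
    -- closedness: no condition fired in a full pass, so every ok neighbour is already visited
    intro p hp q hadj hok
    have hqc : q ∈ pvCells rows cols := by
      have := pvMem_cells (nr := q.1) (nc := q.2) hok.1
      simpa using this
    have hcf := hnone q hqc
    by_contra hqv
    obtain ⟨d, hd, hqeq⟩ := hadj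
    subst hqeq
    -- p is one of q's four neighbours, so the disjunction in pvCondB holds, contradiction
    have : pvCondB grid visited (p.1 + d.1, p.2 + d.2) = true := by
      simp only [pvCondB, Bool.and_eq_true, Bool.or_eq_true]
      refine ⟨⟨hok.2, ?_⟩, ?_⟩
      · simp [hqv]
      · fin_cases hd <;> simp <;> tauto
    rw [hcf] at this
    exact absurd this (by simp)

-- ===== VERDICT (by name: the statement is the Claim_ definition above) =====
theorem list_all_escape_routes_spec : Claim_equal_list_all_escape_routes := by
  intro grid _dom _pre
  unfold Spec_list_all_escape_routes
  simp only [list_all_escape_routes, list_all_escape_routes_alt]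
  by_cases hg : grid = []
  · simp [hg]
  · simp only [hg, if_false]
    by_cases hz : ((grid.length : Int) = 0 ∨ ((grid.headD []).length : Int) = 0)
    · simp only [hz, if_true]
    · simp only [hz, if_false]
      set rows := (grid.length : Int) with hrows
      set cols := ((grid.headD []).length : Int) with hcols
      set st : Int × Int := (rows - 1, cols - 1) with hst
      have hinit : PySem.Set.add PySem.Set.empty st = [st] := rfl
      rw [hinit]
      obtain ⟨A1, A2, A3, A4⟩ := pvLoopA_spec grid rows cols st [st] [st]
        (fun x hx => hx) (fun p hp hnp => absurd hp hnp)
        (fun p hp => by rw [List.mem_singleton.mp hp]; exact pvReach.base)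
        (by simp)
      obtain ⟨B1, B2, B3, B4⟩ := pvLoopFix_spec grid rows cols st [st]
        (fun p hp => by rw [List.mem_singleton.mp hp]; exact pvReach.base)
        (by simp)
      refine PySem.List.sorted_eq_sorted_of_perm _ _ _ toLex.injective ?_
      refine (List.perm_ext_iff_of_nodup A4 B4).mpr ?_
      intro x
      constructor
      · intro hx; exact pvReach_subset (B1 st (List.mem_singleton.mpr rfl)) B3 x (A2 x hx)
      · intro hx; exact pvReach_subset (A1 st (List.mem_singleton.mpr rfl)) A3 x (B2 x hx)
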